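-- pv_equiv track=rewrite | github.com/COSSAS/Certitude | certitude/utils/miscellaneous.py | count_delimiters
-- ===== SOURCE A (Python) =====
-- def count_delimiters(my_string: str) -> int:
--     """script used for counting delimiters in different parts of URL"""
--     count = 0
--     delimiters = [
--         ";",
--         "_",
--         "?",
--         "=",
--         "&",
--         "|",
--         "$",
--         "-",
--         "_",
--         ".",
--         "+",
--         "!",
--         "*",
--         "'",
--         "(",
--         ")",
--     ]
--     for letter in my_string:
--         if letter in delimiters:
--             count = count + 1
--     return count
-- ===== SOURCE B (Python) =====
-- def count_delimiters(my_string: str) -> int: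
--     """Sum str.count of each distinct delimiter (outer loop over delimiters)."""
--     return sum(my_string.count(d) for d in ";_?=&|$-.+!*'()")
-- ===== Notes on version B (the rewrite author's own statement) =====
-- stated objective: faster
-- what changed: Instead of a Python-level loop over the string membership-testing each character against the 16-entry delimiter list, B loops over the 15 distinct delimiters and sums str.count of each (the scans run in C).
import Mathlib
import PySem

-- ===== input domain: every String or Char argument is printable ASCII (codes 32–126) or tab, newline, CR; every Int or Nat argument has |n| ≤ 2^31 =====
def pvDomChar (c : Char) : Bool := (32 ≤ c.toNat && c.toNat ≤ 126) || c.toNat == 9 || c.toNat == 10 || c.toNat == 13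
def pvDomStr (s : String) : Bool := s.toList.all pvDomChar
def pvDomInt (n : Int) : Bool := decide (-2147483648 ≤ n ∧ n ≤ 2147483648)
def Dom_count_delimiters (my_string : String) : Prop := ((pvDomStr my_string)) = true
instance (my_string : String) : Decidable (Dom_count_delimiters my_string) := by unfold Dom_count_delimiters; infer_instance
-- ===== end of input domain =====

-- B flips the loop: instead of scanning the string and membership-testing each character,
-- it sums my_string.count(d) over the 15 distinct delimiters (same cost, different decomposition).

-- ===== PORT A =====
-- A's delimiter list (Python list of 1-char strings, with '_' duplicated), as chars
def pvDelimsA : List Char :=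
  [';', '_', '?', '=', '&', '|', '$', '-', '_', '.', '+', '!', '*', '\'', '(', ')']

def count_delimiters (my_string : String) : Int :=
  my_string.toList.foldl
    (fun count letter => if pvDelimsA.contains letter then count + 1 else count) 0

-- ===== PORT B =====
def count_delimiters_alt (my_string : String) : Int :=
  ((";_?=&|$-.+!*'()".toList).map
    (fun d => (PySem.Str.count my_string (String.singleton d) : Int))).sum

-- ===== PRECONDITION & SPEC =====
def Spec_count_delimiters (my_string : String) (out : Int) : Prop := out = count_delimiters_alt my_string
instance (my_string : String) (out : Int) : Decidable (Spec_count_delimiters my_string out) := by unfold Spec_count_delimiters; infer_instance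

-- ===== CLAIM (what is proved, stated in full; the proofs are below) =====
def Claim_equal_count_delimiters : Prop := ∀ (my_string : String), Dom_count_delimiters my_string → Spec_count_delimiters my_string (count_delimiters my_string)

-- ===== LEMMAS AND PROOFS =====

-- Chars.count.go with a single-char pattern counts occurrences of that char
lemma count_go_single (c : Char) (l : List Char) (fuel acc : Nat) (h : l.length ≤ fuel) :
    PySem.Chars.count.go [c] fuel l acc = acc + l.count c := by
  induction l generalizing fuel acc with
  | nil => cases fuel <;> simp [PySem.Chars.count.go]
  | cons x t ih =>
    cases fuel with
    | zero => simp at h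
    | succ f =>
      have hf : t.length ≤ f := by simpa using h
      by_cases hx : c = x
      · subst hx
        simp [PySem.Chars.count.go, List.isPrefixOf, ih _ _ hf]
        omega
      · simp [PySem.Chars.count.go, List.isPrefixOf, beq_iff_eq, hx, ih _ _ hf, Ne.symm hx]

-- Python s.count(c) for a single character c is the List.count of c in s
lemma chars_count_single (s : List Char) (c : Char) :
    PySem.Chars.count s [c] = s.count c := by
  simp [PySem.Chars.count, count_go_single c s s.length 0 le_rfl]

-- a nodup list counts any element 0 or 1 times
lemma count_nodup_ite {D : List Char} (h : D.Nodup) (c : Char) :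
    (D.count c : Int) = if D.contains c then 1 else 0 := by
  by_cases hm : c ∈ D
  · have h1 : D.count c ≤ 1 := (List.nodup_iff_count_le_one.mp h) c
    have h2 : 0 < D.count c := List.count_pos_iff.mpr hm
    simp [hm]; omega
  · simp [List.count_eq_zero.mpr hm, hm]

-- the deduplicated delimiter string tests membership in the same set as A's list
lemma contains_B_eq_A : ∀ c : Char, (";_?=&|$-.+!*'()".toList).contains c = pvDelimsA.contains c := by
  intro c
  by_cases h : c = '_' <;> simp [pvDelimsA, h]

-- the exchange lemma: summing per-delimiter counts equals one filtered scan
lemma sum_counts_eq_countP (D : List Char) (hD : D.Nodup)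
    (hEq : ∀ c, D.contains c = pvDelimsA.contains c) (l : List Char) :
    (D.map (fun d => (l.count d : Int))).sum = (l.countP (fun c => pvDelimsA.contains c) : Int) := by
  induction l with
  | nil => simp
  | cons c l ih =>
    have hsum : (D.map (fun d => (l.count d : Int))).sum
        + (D.map (fun d => if d == c then (1:Int) else 0)).sum
        = (D.map (fun d => ((c :: l).count d : Int))).sum := by
      rw [← List.sum_map_add]
      refine congrArg List.sum (List.map_congr_left ?_)
      intro d _
      rw [List.count_cons]
      push_cast
      by_cases h : d = c
      · subst h; simp
      · simp [h, (Ne.symm h : c ≠ d)]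
    have hone : (D.map (fun d => if d == c then (1:Int) else 0)).sum
        = if pvDelimsA.contains c then 1 else 0 := by
      rw [PySem.List.sum_map_ite_one_zero]
      have hc : D.countP (fun d => d == c) = D.count c := rfl
      rw [hc, count_nodup_ite hD c, hEq c]
    rw [← hsum, ih, hone, List.countP_cons]
    split <;> simp_all

-- ===== VERDICT (by name: the statement is the Claim_ definition above) =====
theorem count_delimiters_spec : Claim_equal_count_delimiters := by
  intro s _
  unfold Spec_count_delimiters count_delimiters count_delimiters_alt
  rw [PySem.List.foldl_if_add_one]
  have hcnt : ∀ d : Char, (PySem.Str.count s (String.singleton d) : Int) = (s.toList.count d : Int) := by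
    intro d
    have : PySem.Str.count s (String.singleton d) = PySem.Chars.count s.toList [d] := by
      simp [String.singleton]
    rw [this, chars_count_single]
  simp only [hcnt]
  rw [sum_counts_eq_countP (";_?=&|$-.+!*'()".toList) (by decide) contains_B_eq_A]
  norm_cast
  simp
  refine List.countP_congr ?_
  intro c _
  simp
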